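-- pv_equiv track=rewrite | github.com/bngybongybrd/Code-Jam | Farewell_Round/Untie.py | untie
-- ===== SOURCE A (Python) =====
-- def untie(case_no, c):
--     min = 0
--     if all(i == c[0] for i in c):
--         c += c[0]
--     elif c[0] == c[-1]:
--         for i in range(len(c)-1, 0, -1):
--             if c[i-1] != c[-1]:
--                 c = c[i:] + c[:i]
--                 break
--     counter = 1
--     for i in range(len(c)-1):
--         if c[i] == c[i+1]:
--             counter += 1
--         else:
--             min += counter // 2
--             counter = 1
--     min += counter // 2
--     output = f'Case #{case_no}: {min}'
--     return output
-- ===== SOURCE B (Python) =====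
-- def untie(case_no, c):
--     runs = []
--     cur = 1
--     for i in range(1, len(c)):
--         if c[i] == c[i-1]:
--             cur += 1
--         else:
--             runs.append(cur)
--             cur = 1
--     runs.append(cur)
--     if len(runs) == 1:
--         m = (len(c) + 1) // 2
--     elif c[0] == c[-1]:
--         m = (runs[0] + runs[-1]) // 2 + sum(r // 2 for r in runs[1:-1])
--     else:
--         m = sum(r // 2 for r in runs)
--     return f'Case #{case_no}: {m}'
-- ===== Notes on version B (the rewrite author's own statement) =====
-- stated objective: alternative
-- what changed: B builds a run-length encoding in one pass and sums run//2 over it, merging the first and last runs arithmetically when the string wraps, instead of A's in-place string rotation (slice-and-concat rebuild) followed by a second counter scan.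
import Mathlib
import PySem

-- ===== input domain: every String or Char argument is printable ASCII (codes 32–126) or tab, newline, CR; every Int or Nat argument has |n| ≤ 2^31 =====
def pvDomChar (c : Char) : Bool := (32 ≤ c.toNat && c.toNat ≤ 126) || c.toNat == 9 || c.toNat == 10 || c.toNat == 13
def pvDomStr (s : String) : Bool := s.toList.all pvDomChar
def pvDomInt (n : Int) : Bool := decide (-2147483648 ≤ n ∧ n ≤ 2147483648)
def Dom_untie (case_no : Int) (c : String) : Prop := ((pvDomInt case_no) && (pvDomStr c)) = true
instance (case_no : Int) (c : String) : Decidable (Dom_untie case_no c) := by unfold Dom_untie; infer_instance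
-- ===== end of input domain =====

-- B replaces A's in-place rotation (slice-and-concat) + second counter scan by a single
-- run-length-encoding pass whose first and last runs are merged arithmetically ("alternative";
-- equivalence is about the return value; A raises IndexError on the empty string, excluded by Pre_).

-- ===== PORT A =====
-- A's rotation loop: for i in range(len(c)-1, 0, -1): if c[i-1] != c[-1]: c = c[i:]+c[:i]; break
-- (index k = i-1 is always in range when reached; drop/take is exact for the in-range slice c[i:]+c[:i])
def rotLoopA (cs : List Char) (lst : Char) : Nat → List Char
  | 0 => cs
  | k+1 => if cs.getD k lst ≠ lst then cs.drop (k+1) ++ cs.take (k+1) else rotLoopA cs lst k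

-- A's counter loop over adjacent pairs (counter, min accumulators as in the Python)
def scanA : List Char → Int → Int → Int
  | a :: b :: rest, counter, m =>
      if a = b then scanA (b :: rest) (counter + 1) m
      else scanA (b :: rest) 1 (m + PySem.Int.floordiv counter 2)
  | _, counter, m => m + PySem.Int.floordiv counter 2

def untie (case_no : Int) (c : String) : String :=
  let cs := c.toList
  let cs2 :=
    match cs with
    | [] => cs  -- Python raises IndexError at c[0] here; excluded by Pre_untie
    | c0 :: rest =>
      if (c0 :: rest).all (fun i => i = c0) then (c0 :: rest) ++ [c0]
      else if c0 = (c0 :: rest).getLast (List.cons_ne_nil _ _) then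
        rotLoopA (c0 :: rest) ((c0 :: rest).getLast (List.cons_ne_nil _ _)) ((c0 :: rest).length - 1)
      else c0 :: rest
  "Case #" ++ PySem.Int.toStr case_no ++ ": " ++ PySem.Int.toStr (scanA cs2 1 0)

-- ===== PORT B =====
-- Source B's RLE loop: cur=1; for i in 1..: if c[i]==c[i-1] cur+=1 else runs.append(cur); cur=1; runs.append(cur)
def rleLoopB : List Char → Char → Int → List Int
  | [], _, cur => [cur]
  | x :: rest, prev, cur =>
      if x = prev then rleLoopB rest x (cur + 1) else cur :: rleLoopB rest x 1

def untie_alt (case_no : Int) (c : String) : String :=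
  let cs := c.toList
  let runs : List Int :=
    match cs with
    | [] => [1]            -- Source B: the loop body never runs, runs = [cur] = [1]
    | c0 :: rest => rleLoopB rest c0 1
  let m : Int :=
    if runs.length = 1 then PySem.Int.floordiv ((cs.length : Int) + 1) 2
    else if cs.headD ' ' = cs.getLastD ' ' then   -- c[0] == c[-1]; cs ≠ [] whenever this line is reached
      PySem.Int.floordiv (runs.headD 0 + runs.getLastD 0) 2
        + ((PySem.List.slice runs (some 1) (some (-1))).map (fun r => PySem.Int.floordiv r 2)).sum
    else (runs.map (fun r => PySem.Int.floordiv r 2)).sum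
  "Case #" ++ PySem.Int.toStr case_no ++ ": " ++ PySem.Int.toStr m

-- ===== PRECONDITION & SPEC =====
-- Pre_ excludes only the empty string, on which A raises IndexError at c[0] (B returns 'Case #k: 0' there).
def Pre_untie (case_no : Int) (c : String) : Prop := c ≠ ""
instance (case_no : Int) (c : String) : Decidable (Pre_untie case_no c) := by
  unfold Pre_untie; infer_instance
def pvWitness_untie : Int × String := (1, "aab")

def Spec_untie (case_no : Int) (c : String) (out : String) : Prop := out = untie_alt case_no c
instance (case_no : Int) (c : String) (out : String) : Decidable (Spec_untie case_no c out) := by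
  unfold Spec_untie; infer_instance

-- ===== CLAIM (what is proved, stated in full; the proofs are below) =====
def Claim_equal_untie : Prop := ∀ (case_no : Int) (c : String), Dom_untie case_no c → Pre_untie case_no c → Spec_untie case_no c (untie case_no c)

-- ===== LEMMAS AND PROOFS =====

-- sum of r//2 over a run list (proof-side abbreviation for both programs' sums)
def sumdiv (rs : List Int) : Int := (rs.map (fun r => PySem.Int.floordiv r 2)).sum

theorem sumdiv_cons (a : Int) (l : List Int) :
    sumdiv (a :: l) = PySem.Int.floordiv a 2 + sumdiv l := by
  simp [sumdiv]

-- A's counter scan computes the sum of run//2 over B's RLE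
theorem scanA_eq (rest : List Char) (x : Char) (cur m : Int) :
    scanA (x :: rest) cur m = m + sumdiv (rleLoopB rest x cur) := by
  induction rest generalizing x cur m with
  | nil => simp [scanA, rleLoopB, sumdiv]
  | cons y r ih =>
    by_cases h : x = y
    · rw [scanA, if_pos h, rleLoopB, if_pos h.symm, ih]
    · rw [scanA, if_neg h, rleLoopB, if_neg (fun hy => h hy.symm), ih, sumdiv_cons]
      ring

theorem rleLoopB_ne_nil (rest : List Char) (x : Char) (cur : Int) :
    rleLoopB rest x cur ≠ [] := by
  induction rest generalizing x cur with
  | nil => simp [rleLoopB]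
  | cons y r ih =>
    by_cases h : y = x
    · rw [rleLoopB, if_pos h]; exact ih y (cur + 1)
    · rw [rleLoopB, if_neg h]; simp

-- merging a replicate prefix into the running counter
theorem rleLoopB_replicate (k : Nat) (x : Char) (rest : List Char) (cur : Int) :
    rleLoopB (List.replicate k x ++ rest) x cur = rleLoopB rest x (cur + k) := by
  induction k generalizing cur with
  | zero => simp
  | succ n ih =>
    rw [List.replicate_succ, List.cons_append, rleLoopB, if_pos rfl, ih]
    congr 1
    push_cast
    ring

theorem rleLoopB_all (rest : List Char) (x : Char) (cur : Int)
    (h : ∀ y ∈ rest, y = x) : rleLoopB rest x cur = [cur + rest.length] := by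
  induction rest generalizing cur with
  | nil => simp [rleLoopB]
  | cons y r ih =>
    have hy : y = x := h y (by simp)
    subst hy
    rw [rleLoopB, if_pos rfl, ih (cur + 1) (fun z hz => h z (by simp [hz]))]
    simp only [List.length_cons]
    congr 1
    push_cast
    ring

theorem rleLoopB_two_le (rest : List Char) (x : Char) (cur : Int)
    (h : ¬ ∀ y ∈ rest, y = x) : 2 ≤ (rleLoopB rest x cur).length := by
  induction rest generalizing x cur with
  | nil => exact absurd (by simp) h
  | cons y r ih =>
    by_cases hy : y = x
    · subst hy
      rw [rleLoopB, if_pos rfl]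
      exact ih y (cur + 1) (fun hall => h (by simpa using hall))
    · rw [rleLoopB, if_neg hy]
      have h1 : 0 < (rleLoopB r y 1).length := List.length_pos_iff.mpr (rleLoopB_ne_nil r y 1)
      simp only [List.length_cons]
      omega

-- runs split at a boundary where the last character before differs from the first after
theorem rleLoopB_break (rest : List Char) (prev : Char) (cur : Int) (b : Char) (t : List Char)
    (h : (prev :: rest).getLast (List.cons_ne_nil _ _) ≠ b) :
    rleLoopB (rest ++ b :: t) prev cur = rleLoopB rest prev cur ++ rleLoopB t b 1 := by
  induction rest generalizing prev cur with
  | nil =>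
    simp only [List.getLast_singleton] at h
    simp only [List.nil_append, rleLoopB]
    rw [if_neg (fun hb : b = prev => h hb.symm)]
    simp
  | cons y r ih =>
    have h' : (y :: r).getLast (List.cons_ne_nil _ _) ≠ b := by
      rwa [List.getLast_cons (List.cons_ne_nil _ _)] at h
    by_cases hy : y = prev
    · subst hy
      rw [List.cons_append, rleLoopB, if_pos rfl, rleLoopB, if_pos rfl, ih y _ h']
    · rw [List.cons_append, rleLoopB, if_neg hy, rleLoopB, if_neg hy, ih y _ h', List.cons_append]

-- the head run absorbs the starting counter, the tail runs do not depend on it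
theorem rleLoopB_shift (rest : List Char) (x : Char) (a b : Int) :
    ∃ h t, rleLoopB rest x a = (a + h) :: t ∧ rleLoopB rest x b = (b + h) :: t := by
  induction rest generalizing x a b with
  | nil => exact ⟨0, [], by simp [rleLoopB], by simp [rleLoopB]⟩
  | cons y r ih =>
    by_cases hy : y = x
    · subst hy
      obtain ⟨h, t, h1, h2⟩ := ih y (a + 1) (b + 1)
      exact ⟨h + 1, t, by rw [rleLoopB, if_pos rfl, h1]; congr 1; ring,
             by rw [rleLoopB, if_pos rfl, h2]; congr 1; ring⟩
    · exact ⟨0, rleLoopB r y 1, by simp [rleLoopB, hy], by simp [rleLoopB, hy]⟩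

-- A's rotation loop lands exactly at the start of the trailing run
theorem rotLoopA_spec (u : List Char) (lst : Char) (k : Nat) (hu : u ≠ [])
    (hul : u.getLast hu ≠ lst) :
    ∀ t, t < k → rotLoopA (u ++ List.replicate k lst) lst (u.length + t) =
      List.replicate k lst ++ u := by
  intro t
  induction t with
  | zero =>
    intro hk
    obtain ⟨n, hn⟩ : ∃ n, u.length = n + 1 :=
      ⟨u.length - 1, by have := List.length_pos_iff.mpr hu; omega⟩
    rw [Nat.add_zero, hn, rotLoopA]
    have hget : (u ++ List.replicate k lst).getD n lst = u.getLast hu := by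
      rw [List.getD_eq_getElem?_getD, List.getElem?_append_left (by omega),
        List.getLast_eq_getElem]
      simp [hn]
    rw [hget, if_pos hul, ← hn, List.drop_left, List.take_left]
  | succ t ih =>
    intro hk
    have hlt : u.length + t < (u ++ List.replicate k lst).length := by
      simp; omega
    rw [show u.length + (t + 1) = (u.length + t) + 1 by ring, rotLoopA]
    have hget : (u ++ List.replicate k lst).getD (u.length + t) lst = lst := by
      rw [List.getD_eq_getElem?_getD, List.getElem?_append_right (by omega)]
      simp only [Nat.add_sub_cancel_left, List.getElem?_replicate]
      simp [show t < k by omega]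
    rw [hget, if_neg (by simp), ih (by omega)]

-- trailing-run decomposition of a string whose characters are not all equal to its last one
theorem trailing_run (cs : List Char) (hne : cs ≠ []) (lst : Char)
    (hlst : cs.getLast hne = lst) (hnall : ¬ ∀ y ∈ cs, y = lst) :
    ∃ (u : List Char) (k : Nat) (hu : u ≠ []),
      cs = u ++ List.replicate k lst ∧ u.getLast hu ≠ lst ∧ 1 ≤ k := by
  obtain ⟨a, tl, hrev⟩ : ∃ a tl, cs.reverse = a :: tl := by
    cases h : cs.reverse with
    | nil => exact absurd (by simpa using h) hne
    | cons a tl => exact ⟨a, tl, rfl⟩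
  have ha : a = lst := by
    have h1 : cs.reverse.head? = cs.getLast? := List.head?_reverse
    rw [hrev, List.head?_cons, List.getLast?_eq_some_getLast hne, hlst] at h1
    exact (Option.some.injEq _ _ ▸ h1).symm ▸ rfl
  subst ha
  set p : Char → Bool := fun y => y == a with hp
  set tW := tl.takeWhile p with htW
  set r := tl.dropWhile p with hrdef
  have hsplit : tW ++ r = tl := List.takeWhile_append_dropWhile
  have hrne : r ≠ [] := by
    intro h0
    apply hnall
    intro y hy
    have hy' : y ∈ a :: tl := by rw [← hrev]; exact List.mem_reverse.mpr hy
    rcases List.mem_cons.mp hy' with h | h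
    · exact h
    · have := List.dropWhile_eq_nil_iff.mp h0 y h
      simpa [hp] using this
  have hwrep : (a :: tW) = List.replicate (tW.length + 1) a := by
    have : ∀ b ∈ a :: tW, b = a := by
      intro b hb
      rcases List.mem_cons.mp hb with h | h
      · exact h
      · simpa [hp] using List.mem_takeWhile_imp h
    simpa using List.eq_replicate_of_mem this
  have hcs : cs = r.reverse ++ List.replicate (tW.length + 1) a := by
    have : cs = (a :: tl).reverse := by rw [← hrev, List.reverse_reverse]
    rw [this, ← hsplit]
    rw [show (a :: (tW ++ r)) = (a :: tW) ++ r from rfl, List.reverse_append, hwrep,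
      List.reverse_replicate]
  have hu : r.reverse ≠ [] := by simpa using hrne
  refine ⟨r.reverse, tW.length + 1, hu, hcs, ?_, by omega⟩
  have h1 : r.reverse.getLast hu = r.head hrne := List.getLast_reverse (by simpa using hu)
  rw [h1]
  have := List.head_dropWhile_not p hrne
  simpa [hp] using this

-- Source B's runs[1:-1] on a run list of the shape first :: (middle ++ [last])
theorem slice_mid (a : Int) (t : List Int) (b : Int) :
    PySem.List.slice (a :: (t ++ [b])) (some 1) (some (-1)) = t := by
  simp [PySem.List.slice, PySem.List.clampIdx]
  split_ifs with hif
  · exact absurd hif (by omega)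
  · rw [show t.length + 1 - 1 = t.length from rfl, List.take_left]

-- the two branch structures compute the same count, on the list side
theorem key (c0 : Char) (rest : List Char) :
    scanA
      (if (c0 :: rest).all (fun i => i = c0) then (c0 :: rest) ++ [c0]
       else if c0 = (c0 :: rest).getLast (List.cons_ne_nil _ _) then
         rotLoopA (c0 :: rest) ((c0 :: rest).getLast (List.cons_ne_nil _ _)) ((c0 :: rest).length - 1)
       else c0 :: rest) 1 0
    = (if (rleLoopB rest c0 1).length = 1 then PySem.Int.floordiv (((c0 :: rest).length : Int) + 1) 2
       else if (c0 :: rest).headD ' ' = (c0 :: rest).getLastD ' ' then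
         PySem.Int.floordiv ((rleLoopB rest c0 1).headD 0 + (rleLoopB rest c0 1).getLastD 0) 2
           + ((PySem.List.slice (rleLoopB rest c0 1) (some 1) (some (-1))).map
               (fun r => PySem.Int.floordiv r 2)).sum
       else ((rleLoopB rest c0 1).map (fun r => PySem.Int.floordiv r 2)).sum) := by
  by_cases hall : (c0 :: rest).all (fun i => i = c0) = true
  · rw [if_pos hall]
    have hrest : ∀ y ∈ rest, y = c0 := by
      intro y hy
      have := List.all_eq_true.mp hall y (by simp [hy])
      simpa using this
    rw [rleLoopB_all rest c0 1 hrest]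
    rw [if_pos (by simp)]
    rw [show ((c0 :: rest) ++ [c0]) = c0 :: (rest ++ [c0]) from rfl, scanA_eq]
    rw [rleLoopB_all (rest ++ [c0]) c0 1 (by
      intro y hy
      rcases List.mem_append.mp hy with h | h
      · exact hrest y h
      · simpa using h)]
    simp only [sumdiv, List.map_cons, List.map_nil, List.sum_cons, List.sum_nil, zero_add,
      add_zero]
    congr 1
    simp only [List.length_append, List.length_cons, List.length_nil]
    push_cast
    ring
  · have hnall : ¬ ∀ y ∈ (c0 :: rest), y = c0 := by
      intro h
      exact hall (List.all_eq_true.mpr (fun y hy => by simp [h y hy]))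
    have hrest' : ¬ ∀ y ∈ rest, y = c0 := by
      intro h
      apply hnall
      intro y hy
      rcases List.mem_cons.mp hy with h0 | h0
      · exact h0
      · exact h y h0
    have hlen2 := rleLoopB_two_le rest c0 1 hrest'
    rw [if_neg hall, if_neg (by omega : ¬ (rleLoopB rest c0 1).length = 1)]
    set lst := (c0 :: rest).getLast (List.cons_ne_nil _ _) with hlstdef
    have hheadD : (c0 :: rest).headD ' ' = c0 := rfl
    have hlastD : (c0 :: rest).getLastD ' ' = lst := by
      rw [List.getLastD_eq_getLast?, List.getLast?_eq_some_getLast (List.cons_ne_nil c0 rest)]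
      rfl
    by_cases hc : c0 = lst
    · rw [if_pos hc, if_pos (by rw [hheadD, hlastD]; exact hc)]
      have hnall_lst : ¬ ∀ y ∈ (c0 :: rest), y = lst := by
        intro h
        exact hnall (fun y hy => (h y hy).trans hc.symm)
      obtain ⟨u, k, hu, hcseq, hul, hk⟩ :=
        trailing_run (c0 :: rest) (List.cons_ne_nil _ _) lst hlstdef.symm hnall_lst
      obtain ⟨u0, u', huu⟩ : ∃ u0 u', u = u0 :: u' := by
        cases u with
        | nil => exact absurd rfl hu
        | cons a b => exact ⟨a, b, rfl⟩
      subst huu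
      rw [List.cons_append] at hcseq
      obtain ⟨hc0, hresteq⟩ : c0 = u0 ∧ rest = u' ++ List.replicate k lst := by
        have := List.cons.injEq c0 rest u0 (u' ++ List.replicate k lst) ▸ hcseq
        exact ⟨this.1, this.2⟩
      have hcseq' : (c0 :: rest) = (u0 :: u') ++ List.replicate k lst := by
        rw [List.cons_append]; exact hcseq
      have hlen : (c0 :: rest).length - 1 = (u0 :: u').length + (k - 1) := by
        rw [hcseq']
        simp [List.length_append]
        omega
      have hrot : rotLoopA (c0 :: rest) lst ((c0 :: rest).length - 1)
          = List.replicate k lst ++ (u0 :: u') := by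
        rw [hlen, hcseq']
        exact rotLoopA_spec (u0 :: u') lst k hu hul (k - 1) (by omega)
      rw [hrot]
      obtain ⟨k', hk'⟩ : ∃ k', k = k' + 1 := ⟨k - 1, by omega⟩
      subst hk'
      have hu0 : u0 = lst := hc0.symm.trans hc
      rw [List.replicate_succ, List.cons_append, scanA_eq, rleLoopB_replicate,
        show rleLoopB (u0 :: u') lst (1 + (k' : Int)) = rleLoopB u' u0 (1 + (k' : Int) + 1) from by
          rw [rleLoopB, if_pos hu0]]
      obtain ⟨h, t, hA, hB⟩ := rleLoopB_shift u' u0 (1 + (k' : Int) + 1) 1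
      rw [hA]
      have hrunseq : rleLoopB rest c0 1 = ((1 + h) :: t) ++ [1 + (k' : Int)] := by
        rw [hresteq, hc0, List.replicate_succ,
          rleLoopB_break u' u0 1 lst (List.replicate k' lst) (by exact hul), hB]
        congr 1
        rw [← List.append_nil (List.replicate k' lst), rleLoopB_replicate]
        rfl
      rw [hrunseq]
      have e3 : PySem.List.slice (((1 + h) :: t) ++ [1 + (k' : Int)]) (some 1) (some (-1)) = t := by
        rw [List.cons_append]; exact slice_mid _ _ _
      rw [show (((1 + h) :: t) ++ [1 + (k' : Int)]).headD 0 = 1 + h from rfl,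
        List.getLastD_concat, e3]
      simp only [sumdiv, List.map_cons, List.sum_cons, zero_add]
      congr 1
      ring
    · rw [if_neg hc, if_neg (by rw [hheadD, hlastD]; exact hc), scanA_eq, sumdiv]
      simp

-- ===== VERDICT (by name: the statement is the Claim_ definition above) =====
theorem untie_spec : Claim_equal_untie := by
  intro case_no c _ hpre
  unfold Spec_untie untie untie_alt
  obtain ⟨c0, rest, hrep⟩ : ∃ c0 rest, c.toList = c0 :: rest := by
    cases h : c.toList with
    | nil => exact absurd (String.toList_eq_nil_iff.mp h) hpre
    | cons a l => exact ⟨a, l, rfl⟩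
  simp only [hrep]
  exact congrArg (fun z => "Case #" ++ PySem.Int.toStr case_no ++ ": " ++ PySem.Int.toStr z)
    (key c0 rest)
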